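-- pv_equiv track=rewrite | github.com/Peter-32/6_poker_reinforcement_learning | functions/preflop.py | get_range_player_1
-- ===== SOURCE A (Python) =====
-- def get_range_player_1(actions):
--     if sum(['r' in x for x in actions]) > 1:
--         return 12
--     elif 'r' in actions[0] and sum(['r' in x for x in actions[1:]]) == 0:
--         return 1
--     elif 'r' in actions[1] and sum(['r' in x for x in (actions[0:1] + actions[2:])]) == 0:
--         return 2
--     elif 'r' in actions[2] and sum(['r' in x for x in (actions[0:2] + actions[3:])]) == 0:
--         return 3
--     elif 'r' in actions[3] and sum(['r' in x for x in (actions[0:3] + actions[4:])]) == 0: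
--         return 4
--     elif 'r' in actions[4] and sum(['r' in x for x in (actions[0:4] + actions[5:])]) == 0:
--         return 5
--     elif sum(['c' == x or 'rc' == x for x in actions]) == 1:
--         return 11
--     else:
--         return 12
-- ===== SOURCE B (Python) =====
-- def get_range_player_1(actions):
--     r_count = 0
--     c_count = 0
--     first_r = None
--     for i, x in enumerate(actions):
--         if 'r' in x:
--             r_count += 1
--             if first_r is None:
--                 first_r = i
--         if x == 'c' or x == 'rc':
--             c_count += 1
--     if r_count > 1:
--         return 12
--     if first_r is not None and first_r < 5:
--         return first_r + 1
--     return 11 if c_count == 1 else 12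
-- ===== Notes on version B (the rewrite author's own statement) =====
-- stated objective: simpler
-- what changed: B replaces A's seven separate scans (one bool-sum per elif branch over freshly built slice copies, plus a final count pass) by a single fused enumerate pass that accumulates raise count, call count and the first raise index, and decides from those three statistics.
import Mathlib
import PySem

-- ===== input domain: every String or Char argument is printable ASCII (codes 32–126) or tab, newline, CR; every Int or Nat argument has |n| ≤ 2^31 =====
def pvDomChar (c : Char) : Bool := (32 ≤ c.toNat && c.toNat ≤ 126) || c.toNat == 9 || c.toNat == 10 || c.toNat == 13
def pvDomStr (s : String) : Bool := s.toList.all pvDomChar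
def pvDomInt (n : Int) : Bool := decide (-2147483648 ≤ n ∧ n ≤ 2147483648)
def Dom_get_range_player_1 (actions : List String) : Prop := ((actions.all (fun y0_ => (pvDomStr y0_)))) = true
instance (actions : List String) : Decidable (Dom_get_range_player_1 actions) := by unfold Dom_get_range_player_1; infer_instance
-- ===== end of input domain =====

-- B makes one fused left-to-right pass accumulating (raise count, call count, first raise index)
-- and decides from those three statistics, replacing A's seven separate scans/slices (simpler).


-- ===== PORT A =====
-- sum([<bool> for x in l])  (Python sums booleans as ints)
def pvRsum (l : List String) : Int :=
  (l.map (fun x => if PySem.Str.isIn "r" x then (1:Int) else 0)).sum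
def pvCsum (l : List String) : Int :=
  (l.map (fun x => if x == "c" || x == "rc" then (1:Int) else 0)).sum

-- literal transliteration of A; each actions[i] access is pyGet? (none = IndexError,
-- excluded by Pre_; the match returns the junk value 0 there)
def get_range_player_1 (actions : List String) : Int :=
  if pvRsum actions > 1 then 12
  else match PySem.List.pyGet? actions 0 with
  | none => 0
  | some a0 =>
    if PySem.Str.isIn "r" a0 ∧ pvRsum (PySem.List.slice actions (some 1) none) = 0 then 1
    else match PySem.List.pyGet? actions 1 with
    | none => 0
    | some a1 =>
      if PySem.Str.isIn "r" a1 ∧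
          pvRsum (PySem.List.slice actions (some 0) (some 1) ++ PySem.List.slice actions (some 2) none) = 0 then 2
      else match PySem.List.pyGet? actions 2 with
      | none => 0
      | some a2 =>
        if PySem.Str.isIn "r" a2 ∧
            pvRsum (PySem.List.slice actions (some 0) (some 2) ++ PySem.List.slice actions (some 3) none) = 0 then 3
        else match PySem.List.pyGet? actions 3 with
        | none => 0
        | some a3 =>
          if PySem.Str.isIn "r" a3 ∧
              pvRsum (PySem.List.slice actions (some 0) (some 3) ++ PySem.List.slice actions (some 4) none) = 0 then 4
          else match PySem.List.pyGet? actions 4 with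
          | none => 0
          | some a4 =>
            if PySem.Str.isIn "r" a4 ∧
                pvRsum (PySem.List.slice actions (some 0) (some 4) ++ PySem.List.slice actions (some 5) none) = 0 then 5
            else if pvCsum actions = 1 then 11
            else 12

-- ===== PORT B =====
-- the single 'for i, x in enumerate(actions)' loop of Source B, carried state
-- (i, r_count, c_count, first_r); first_r is an Option, Python's None
def pvScan (l : List String) (i rc cc : Int) (fr : Option Int) : Int × Int × Option Int :=
  match l with
  | [] => (rc, cc, fr)
  | x :: xs =>
    let rc' := if PySem.Str.isIn "r" x then rc + 1 else rc
    let fr' := if PySem.Str.isIn "r" x then (match fr with | none => some i | some j => some j) else fr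
    let cc' := if x == "c" || x == "rc" then cc + 1 else cc
    pvScan xs (i + 1) rc' cc' fr'

-- 'first_r is not None and first_r < 5' is fr.isSome ∧ fr.getD 0 < 5
def get_range_player_1_alt (actions : List String) : Int :=
  let s := pvScan actions 0 0 0 none
  let rc := s.1
  let cc := s.2.1
  let fr := s.2.2
  if rc > 1 then 12
  else if fr.isSome ∧ fr.getD 0 < 5 then fr.getD 0 + 1
  else if cc = 1 then 11 else 12

-- ===== PRECONDITION & SPEC =====
-- Pre_ excludes exactly the inputs where Python A raises IndexError:
-- fewer than five actions none of which contains 'r'.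
def Pre_get_range_player_1 (actions : List String) : Prop :=
  5 ≤ actions.length ∨ ∃ x ∈ actions, PySem.Str.isIn "r" x = true
instance (actions : List String) : Decidable (Pre_get_range_player_1 actions) := by
  unfold Pre_get_range_player_1; infer_instance

def pvWitness_get_range_player_1 : List String := ["r", "c"]

def Spec_get_range_player_1 (actions : List String) (out : Int) : Prop := out = get_range_player_1_alt actions
instance (actions : List String) (out : Int) : Decidable (Spec_get_range_player_1 actions out) := by unfold Spec_get_range_player_1; infer_instance

-- ===== CLAIM (what is proved, stated in full; the proofs are below) =====
def Claim_equal_get_range_player_1 : Prop := ∀ (actions : List String), Dom_get_range_player_1 actions → Pre_get_range_player_1 actions → Spec_get_range_player_1 actions (get_range_player_1 actions)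

-- ===== LEMMAS AND PROOFS =====

theorem pvRsum_nil : pvRsum [] = 0 := rfl
theorem pvRsum_cons (x : String) (l : List String) :
    pvRsum (x :: l) = (if PySem.Str.isIn "r" x then (1:Int) else 0) + pvRsum l := by
  simp [pvRsum]
theorem pvCsum_cons (x : String) (l : List String) :
    pvCsum (x :: l) = (if x == "c" || x == "rc" then (1:Int) else 0) + pvCsum l := by
  simp [pvCsum]
theorem pvRsum_nonneg (l : List String) : 0 ≤ pvRsum l := by
  induction l with
  | nil => simp [pvRsum]
  | cons x xs ih => rw [pvRsum_cons]; split <;> omega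
theorem pvRsum_append (l1 l2 : List String) : pvRsum (l1 ++ l2) = pvRsum l1 + pvRsum l2 := by
  simp [pvRsum]

-- first index (offset i) of an element containing 'r'
def pvFirstR : List String → Int → Option Int
  | [], _ => none
  | x :: xs, i => if PySem.Str.isIn "r" x then some i else pvFirstR xs (i + 1)

theorem pvScan_eq (l : List String) (i rc cc : Int) (fr : Option Int) :
    pvScan l i rc cc fr = (rc + pvRsum l, cc + pvCsum l, fr.or (pvFirstR l i)) := by
  induction l generalizing i rc cc fr with
  | nil => simp [pvScan, pvRsum, pvCsum, pvFirstR]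
  | cons x xs ih =>
    simp only [pvScan, ih, pvRsum_cons, pvCsum_cons, pvFirstR]
    cases fr <;> by_cases hr : PySem.Str.isIn "r" x <;>
      by_cases hc : x == "c" || x == "rc" <;>
      simp only [hr, hc, if_true, if_false, Bool.false_eq_true, Option.or, Prod.ext_iff] <;>
      refine ⟨by ring, by ring, ?_⟩ <;> simp

theorem pvFirstR_ge (l : List String) (i j : Int) (h : pvFirstR l i = some j) : i ≤ j := by
  induction l generalizing i with
  | nil => simp [pvFirstR] at h
  | cons x xs ih =>
    simp only [pvFirstR] at h
    split at h
    · simp at h; omega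
    · have := ih (i + 1) h; omega

theorem pvFirstR_none_iff (l : List String) (i : Int) :
    pvFirstR l i = none ↔ pvRsum l = 0 := by
  induction l generalizing i with
  | nil => simp [pvFirstR, pvRsum]
  | cons x xs ih =>
    have hn := pvRsum_nonneg xs
    simp only [pvFirstR, pvRsum_cons]
    split <;> simp_all <;> omega

-- pyGet? on a long-enough cons prefix, at the numeral indices 0..4
theorem pg0 {α : Type} (x : α) (xs : List α) : PySem.List.pyGet? (x::xs) 0 = some x :=
  PySem.List.pyGet?_ofNat (x::xs) 0 (by simp)
theorem pg1 {α : Type} (a b : α) (xs : List α) : PySem.List.pyGet? (a::b::xs) 1 = some b :=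
  PySem.List.pyGet?_ofNat (a::b::xs) 1 (by simp)
theorem pg2 {α : Type} (a b c : α) (xs : List α) : PySem.List.pyGet? (a::b::c::xs) 2 = some c :=
  PySem.List.pyGet?_ofNat (a::b::c::xs) 2 (by simp)
theorem pg3 {α : Type} (a b c d : α) (xs : List α) : PySem.List.pyGet? (a::b::c::d::xs) 3 = some d :=
  PySem.List.pyGet?_ofNat (a::b::c::d::xs) 3 (by simp)
theorem pg4 {α : Type} (a b c d e : α) (xs : List α) : PySem.List.pyGet? (a::b::c::d::e::xs) 4 = some e :=
  PySem.List.pyGet?_ofNat (a::b::c::d::e::xs) 4 (by simp)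

-- pyGet? past the end (the IndexError position)
theorem pgn {α : Type} (xs : List α) (i : Int) (h : (xs.length : Int) ≤ i) :
    PySem.List.pyGet? xs i = none := by
  have h0 : ¬ (i < (xs.length : Int)) := by omega
  have h1 : 0 ≤ i := by omega
  simp [PySem.List.pyGet?, PySem.List.pyIdx?, h0, h1]
theorem pgn11 {α : Type} (a : α) : PySem.List.pyGet? [a] 1 = none := pgn _ _ (by simp)
theorem pgn22 {α : Type} (a b : α) : PySem.List.pyGet? [a,b] 2 = none := pgn _ _ (by simp)
theorem pgn33 {α : Type} (a b c : α) : PySem.List.pyGet? [a,b,c] 3 = none := pgn _ _ (by simp)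
theorem pgn44 {α : Type} (a b c d : α) : PySem.List.pyGet? [a,b,c,d] 4 = none := pgn _ _ (by simp)

-- the slices A takes, evaluated on a cons prefix
theorem slf1 {α : Type} (a : α) (xs : List α) : PySem.List.slice (a::xs) (some 1) none = xs := by
  have h := PySem.List.slice_from_natCast (xs := a::xs) (a := 1); simpa using h
theorem slf2 {α : Type} (a b : α) (xs : List α) : PySem.List.slice (a::b::xs) (some 2) none = xs := by
  have h := PySem.List.slice_from_natCast (xs := a::b::xs) (a := 2); simpa using h
theorem slf3 {α : Type} (a b c : α) (xs : List α) : PySem.List.slice (a::b::c::xs) (some 3) none = xs := by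
  have h := PySem.List.slice_from_natCast (xs := a::b::c::xs) (a := 3); simpa using h
theorem slf4 {α : Type} (a b c d : α) (xs : List α) : PySem.List.slice (a::b::c::d::xs) (some 4) none = xs := by
  have h := PySem.List.slice_from_natCast (xs := a::b::c::d::xs) (a := 4); simpa using h
theorem slf5 {α : Type} (a b c d e : α) (xs : List α) : PySem.List.slice (a::b::c::d::e::xs) (some 5) none = xs := by
  have h := PySem.List.slice_from_natCast (xs := a::b::c::d::e::xs) (a := 5); simpa using h
theorem slt1 {α : Type} (a : α) (xs : List α) : PySem.List.slice (a::xs) (some 0) (some 1) = [a] := by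
  have h := PySem.List.slice_to_natCast (xs := a::xs) (b := 1)
  simpa [PySem.List.slice_zero_start] using h
theorem slt2 {α : Type} (a b : α) (xs : List α) : PySem.List.slice (a::b::xs) (some 0) (some 2) = [a,b] := by
  have h := PySem.List.slice_to_natCast (xs := a::b::xs) (b := 2)
  simpa [PySem.List.slice_zero_start] using h
theorem slt3 {α : Type} (a b c : α) (xs : List α) : PySem.List.slice (a::b::c::xs) (some 0) (some 3) = [a,b,c] := by
  have h := PySem.List.slice_to_natCast (xs := a::b::c::xs) (b := 3)
  simpa [PySem.List.slice_zero_start] using h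
theorem slt4 {α : Type} (a b c d : α) (xs : List α) : PySem.List.slice (a::b::c::d::xs) (some 0) (some 4) = [a,b,c,d] := by
  have h := PySem.List.slice_to_natCast (xs := a::b::c::d::xs) (b := 4)
  simpa [PySem.List.slice_zero_start] using h

set_option maxHeartbeats 1000000 in
theorem pv_main (actions : List String) (hpre : Pre_get_range_player_1 actions) :
    get_range_player_1 actions = get_range_player_1_alt actions := by
  match actions with
  | [] =>
    rcases hpre with h | ⟨x, hx, _⟩
    · simp at h
    · simp at hx
  | [a] =>
    simp only [get_range_player_1, get_range_player_1_alt, pvScan_eq, pg0, pgn11, slf1,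
      pvRsum_append, pvRsum_cons, pvRsum_nil, Option.or, zero_add]
    rcases Bool.eq_false_or_eq_true (PySem.Str.isIn "r" a) with hA | hA <;>
    first
      | (simp only [pvFirstR, hA, Bool.false_eq_true, if_true, if_false, false_and,
           true_and, zero_add, Option.isSome_some, Option.isSome_none, Option.getD_some,
           Option.getD_none, and_false]
         split_ifs <;> omega)
      | (exfalso
         rcases hpre with h | ⟨x, hx, hxr⟩
         · simp at h
         · have hall : ∀ y ∈ ([a] : List String), PySem.Str.isIn "r" y = false := by
             intro y hy; fin_cases hy <;> assumption
           rw [hall x hx] at hxr; exact Bool.false_ne_true hxr)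
  | [a, b] =>
    simp only [get_range_player_1, get_range_player_1_alt, pvScan_eq, pg0, pg1, pgn22, slf1, slf2, slt1,
      pvRsum_append, pvRsum_cons, pvRsum_nil, Option.or, zero_add]
    rcases Bool.eq_false_or_eq_true (PySem.Str.isIn "r" a) with hA | hA <;>
    rcases Bool.eq_false_or_eq_true (PySem.Str.isIn "r" b) with hB | hB <;>
    first
      | (simp only [pvFirstR, hA, hB, Bool.false_eq_true, if_true, if_false, false_and,
           true_and, zero_add, Option.isSome_some, Option.isSome_none, Option.getD_some,
           Option.getD_none, and_false]
         split_ifs <;> omega)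
      | (exfalso
         rcases hpre with h | ⟨x, hx, hxr⟩
         · simp at h
         · have hall : ∀ y ∈ ([a, b] : List String), PySem.Str.isIn "r" y = false := by
             intro y hy; fin_cases hy <;> assumption
           rw [hall x hx] at hxr; exact Bool.false_ne_true hxr)
  | [a, b, c] =>
    simp only [get_range_player_1, get_range_player_1_alt, pvScan_eq, pg0, pg1, pg2, pgn33, slf1, slf2, slf3, slt1, slt2,
      pvRsum_append, pvRsum_cons, pvRsum_nil, Option.or, zero_add]
    rcases Bool.eq_false_or_eq_true (PySem.Str.isIn "r" a) with hA | hA <;>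
    rcases Bool.eq_false_or_eq_true (PySem.Str.isIn "r" b) with hB | hB <;>
    rcases Bool.eq_false_or_eq_true (PySem.Str.isIn "r" c) with hC | hC <;>
    first
      | (simp only [pvFirstR, hA, hB, hC, Bool.false_eq_true, if_true, if_false, false_and,
           true_and, zero_add, Option.isSome_some, Option.isSome_none, Option.getD_some,
           Option.getD_none, and_false]
         split_ifs <;> omega)
      | (exfalso
         rcases hpre with h | ⟨x, hx, hxr⟩
         · simp at h
         · have hall : ∀ y ∈ ([a, b, c] : List String), PySem.Str.isIn "r" y = false := by
             intro y hy; fin_cases hy <;> assumption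
           rw [hall x hx] at hxr; exact Bool.false_ne_true hxr)
  | [a, b, c, d] =>
    simp only [get_range_player_1, get_range_player_1_alt, pvScan_eq, pg0, pg1, pg2, pg3, pgn44, slf1, slf2, slf3, slf4, slt1, slt2, slt3,
      pvRsum_append, pvRsum_cons, pvRsum_nil, Option.or, zero_add]
    rcases Bool.eq_false_or_eq_true (PySem.Str.isIn "r" a) with hA | hA <;>
    rcases Bool.eq_false_or_eq_true (PySem.Str.isIn "r" b) with hB | hB <;>
    rcases Bool.eq_false_or_eq_true (PySem.Str.isIn "r" c) with hC | hC <;>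
    rcases Bool.eq_false_or_eq_true (PySem.Str.isIn "r" d) with hD | hD <;>
    first
      | (simp only [pvFirstR, hA, hB, hC, hD, Bool.false_eq_true, if_true, if_false, false_and,
           true_and, zero_add, Option.isSome_some, Option.isSome_none, Option.getD_some,
           Option.getD_none, and_false]
         split_ifs <;> omega)
      | (exfalso
         rcases hpre with h | ⟨x, hx, hxr⟩
         · simp at h
         · have hall : ∀ y ∈ ([a, b, c, d] : List String), PySem.Str.isIn "r" y = false := by
             intro y hy; fin_cases hy <;> assumption
           rw [hall x hx] at hxr; exact Bool.false_ne_true hxr)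
  | a :: b :: c :: d :: e :: rest =>
    have hR := pvRsum_nonneg rest
    simp only [get_range_player_1, get_range_player_1_alt, pvScan_eq, pg0, pg1, pg2, pg3,
      pg4, slf1, slf2, slf3, slf4, slf5, slt1, slt2, slt3, slt4,
      pvRsum_append, pvRsum_cons, pvRsum_nil, Option.or, zero_add]
    rcases Bool.eq_false_or_eq_true (PySem.Str.isIn "r" a) with hA | hA <;>
    rcases Bool.eq_false_or_eq_true (PySem.Str.isIn "r" b) with hB | hB <;>
    rcases Bool.eq_false_or_eq_true (PySem.Str.isIn "r" c) with hC | hC <;>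
    rcases Bool.eq_false_or_eq_true (PySem.Str.isIn "r" d) with hD | hD <;>
    rcases Bool.eq_false_or_eq_true (PySem.Str.isIn "r" e) with hE | hE <;>
    first
      | (simp only [pvFirstR, hA, hB, hC, hD, hE, Bool.false_eq_true, if_true, if_false,
           false_and, true_and, zero_add, Option.isSome_some, Option.getD_some]
         split_ifs <;> omega)
      | (rcases hfr : pvFirstR rest 5 with _ | j
         · have h0 : pvRsum rest = 0 := (pvFirstR_none_iff rest 5).mp hfr
           simp only [pvFirstR, hA, hB, hC, hD, hE, Bool.false_eq_true, if_false, zero_add]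
           norm_num [hfr, h0]
         · have hj : (5:Int) ≤ j := pvFirstR_ge rest 5 j hfr
           simp only [pvFirstR, hA, hB, hC, hD, hE, Bool.false_eq_true, if_false, zero_add]
           norm_num [hfr]
           split_ifs <;> omega)

-- ===== VERDICT (by name: the statement is the Claim_ definition above) =====
theorem get_range_player_1_spec : Claim_equal_get_range_player_1 := by
  intro actions _ hpre
  unfold Spec_get_range_player_1
  exact pv_main actions hpre
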